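-- pv_equiv track=rewrite | github.com/smauricioj/ML-QLearning | Python/Jogo2048/Estado2048.py | olha_esquerda
-- ===== SOURCE A (Python) =====
-- def olha_esquerda(m, i, j):
--     ''' Olha para esquerda da célula i,j e procura valor igual '''
--     if j > 0:
--         for other_j in range(j-1, -1, -1):
--             if m[i][other_j] == 0:
--                 continue
--             elif m[i][other_j] == m[i][j]:
--                 return True
--             else:
--                 return False
--         return False
--     else:
--         return False
-- ===== SOURCE B (Python) =====
-- def olha_esquerda(m, i, j):
--     ''' Olha para esquerda da célula i,j e procura valor igual '''
--     if j <= 0: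
--         return False
--     nonzeros = [x for x in m[i][:j] if x != 0]
--     return bool(nonzeros) and nonzeros[-1] == m[i][j]
-- ===== Notes on version B (the rewrite author's own statement) =====
-- stated objective: simpler
-- what changed: Replaces the right-to-left early-exit index scan with a filtered row-prefix build followed by a last-element comparison (the last nonzero of m[i][:j] is the nearest nonzero left neighbor).
import Mathlib
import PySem

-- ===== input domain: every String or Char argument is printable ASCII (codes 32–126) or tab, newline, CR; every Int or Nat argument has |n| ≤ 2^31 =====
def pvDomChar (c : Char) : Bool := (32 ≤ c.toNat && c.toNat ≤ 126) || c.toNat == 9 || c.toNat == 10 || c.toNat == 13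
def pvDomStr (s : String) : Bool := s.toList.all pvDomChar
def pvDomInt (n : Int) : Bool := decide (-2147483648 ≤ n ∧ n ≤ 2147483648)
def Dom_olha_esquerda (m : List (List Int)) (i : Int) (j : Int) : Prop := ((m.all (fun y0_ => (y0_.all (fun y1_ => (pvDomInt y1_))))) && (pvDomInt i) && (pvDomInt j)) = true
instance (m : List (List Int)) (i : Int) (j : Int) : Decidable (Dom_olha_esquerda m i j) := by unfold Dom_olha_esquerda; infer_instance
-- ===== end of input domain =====

-- B builds the filtered nonzero prefix of the row and compares its last element, instead of
-- A's right-to-left early-exit index scan (objective: simpler).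

-- ===== PORT A =====
-- the 'for other_j in range(j-1, -1, -1)' loop with its three-way branch and early returns
def goA (row : List Int) (j : Int) : List Int → Bool
  | [] => false
  | oj :: rest =>
    if PySem.List.pyGetD row oj 0 = 0 then goA row j rest
    else if PySem.List.pyGetD row oj 0 = PySem.List.pyGetD row j 0 then true
    else false

def olha_esquerda (m : List (List Int)) (i : Int) (j : Int) : Bool :=
  if j > 0 then
    goA (PySem.List.pyGetD m i []) j (PySem.List.pyRange (j - 1) (-1) (-1))
  else false

-- ===== PORT B =====
def olha_esquerda_alt (m : List (List Int)) (i : Int) (j : Int) : Bool :=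
  if j ≤ 0 then false
  else
    let row := PySem.List.pyGetD m i []
    let nonzeros := (PySem.List.slice row none (some j)).filter (fun x => x != 0)
    if nonzeros.isEmpty then false
    else PySem.List.pyGetD nonzeros (-1) 0 == PySem.List.pyGetD row j 0

-- ===== PRECONDITION & SPEC =====
-- Pre_ excludes exactly the inputs where Python A raises IndexError: a positive j with a row
-- index i out of range, or j beyond the row's end reached past a nonzero prefix cell.
def Pre_olha_esquerda (m : List (List Int)) (i : Int) (j : Int) : Prop :=
  j ≤ 0 ∨ (PySem.Raise.InRange m.length i ∧
    (j < PySem.List.len (PySem.List.pyGetD m i []) ∨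
     (j = PySem.List.len (PySem.List.pyGetD m i []) ∧
      ∀ x ∈ PySem.List.pyGetD m i [], x = 0)))
instance (m : List (List Int)) (i : Int) (j : Int) : Decidable (Pre_olha_esquerda m i j) := by
  unfold Pre_olha_esquerda; infer_instance

def pvWitness_olha_esquerda : List (List Int) × Int × Int := ([[2, 0, 2]], 0, 2)

def Spec_olha_esquerda (m : List (List Int)) (i : Int) (j : Int) (out : Bool) : Prop := out = olha_esquerda_alt m i j
instance (m : List (List Int)) (i : Int) (j : Int) (out : Bool) : Decidable (Spec_olha_esquerda m i j out) := by unfold Spec_olha_esquerda; infer_instance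

-- ===== CLAIM (what is proved, stated in full; the proofs are below) =====
def Claim_equal_olha_esquerda : Prop := ∀ (m : List (List Int)) (i : Int) (j : Int), Dom_olha_esquerda m i j → Pre_olha_esquerda m i j → Spec_olha_esquerda m i j (olha_esquerda m i j)


-- ===== LEMMAS AND PROOFS =====

-- A's descending scan over indices n-1..0 computes the last-nonzero test on row.take n
theorem goA_take (row : List Int) (j : Int) :
    ∀ n : Nat, n ≤ row.length →
      goA row j (PySem.List.pyRange ((n : Int) - 1) (-1) (-1)) =
        (match ((row.take n).filter (fun x => x != 0)).getLast? with
          | none => false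
          | some x => x == PySem.List.pyGetD row j 0) := by
  intro n
  induction n with
  | zero =>
    intro _
    rw [PySem.List.pyRange_neg_one_eq_nil (by omega)]
    simp [goA]
  | succ k ih =>
    intro hlen
    have hk : k < row.length := by omega
    have hc : ((k + 1 : Nat) : Int) - 1 = (k : Int) := by push_cast; ring
    rw [hc, PySem.List.pyRange_neg_one_cons (by omega)]
    have hget : PySem.List.pyGetD row (k : Int) 0 = row[k] := by
      rw [PySem.List.pyGetD_natCast]; exact List.getD_eq_getElem row 0 hk
    rw [List.take_succ_eq_append_getElem hk, List.filter_append]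
    simp only [goA, hget]
    by_cases h0 : row[k] = 0
    · rw [if_pos h0, ih (le_of_lt hk)]
      simp [h0]
    · rw [if_neg h0]
      have : [row[k]].filter (fun x => x != 0) = [row[k]] := by simp [h0]
      rw [this, List.getLast?_concat]
      split_ifs with h1 <;> simp [h1]

theorem olha_esquerda_spec : Claim_equal_olha_esquerda := by
  intro m i j _ hpre
  unfold Spec_olha_esquerda olha_esquerda olha_esquerda_alt
  by_cases hj : j ≤ 0
  · rw [if_neg (by omega), if_pos hj]
  · rw [if_pos (by omega : j > 0), if_neg hj]
    have hle : j ≤ PySem.List.len (PySem.List.pyGetD m i []) := by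
      rcases hpre with h | ⟨-, h | ⟨h, -⟩⟩ <;> omega
    rw [PySem.List.len_eq] at hle
    set row := PySem.List.pyGetD m i [] with hrow
    have hjn : j = ((j.toNat : Nat) : Int) := (Int.toNat_of_nonneg (by omega)).symm
    have hn : j.toNat ≤ row.length := by omega
    rw [hjn, goA_take row _ _ hn]
    simp only [PySem.List.slice_to_natCast]
    set nz := (row.take j.toNat).filter (fun x => x != 0) with hnz
    cases hL : nz.getLast? with
    | none =>
      have : nz = [] := List.getLast?_eq_none_iff.mp hL
      simp [this]
    | some x =>
      have hne : nz ≠ [] := by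
        intro h; rw [h] at hL; simp at hL
      rw [if_neg (by simp [List.isEmpty_iff, hne])]
      rw [PySem.List.pyGetD_neg_one nz 0 hne]
      have hx : nz.getLast hne = x := by
        rw [List.getLast?_eq_some_getLast hne] at hL
        exact Option.some.inj hL
      rw [hx]
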